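-- pv_equiv track=rewrite | github.com/AmirrezaFarnamTaheri/StreamlineVPN | vpn_merger/core/health_checker.py | _detect_protocols
-- ===== SOURCE A (Python) =====
-- from typing import Dict, List, Optional, Union
--
-- def _detect_protocols(content: str) -> List[str]:
--     """Detect protocols in content with comprehensive pattern matching.
--
--     Args:
--         content: Raw content to analyze
--
--     Returns:
--         List of detected protocol names
--     """
--     if not content:
--         return []
--
--     protocols = []
--     content_lower = content.lower()
--
--     # Split content into lines and check each line for protocols
--     lines = content_lower.split('\n')
--     for line in lines:
--         line = line.strip()
--         if not line:
--             continue
--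
--         # Check each protocol independently for each line
--         if line.startswith('ssr://') and 'shadowsocksr' not in protocols:
--             protocols.append('shadowsocksr')
--         if line.startswith('ss://') and 'shadowsocks' not in protocols:
--             protocols.append('shadowsocks')
--         if line.startswith('shadowsocks://') and 'shadowsocks' not in protocols:
--             protocols.append('shadowsocks')
--         if line.startswith('vmess://') and 'vmess' not in protocols:
--             protocols.append('vmess')
--         if line.startswith('vless://') and 'vless' not in protocols:
--             protocols.append('vless')
--         if line.startswith('trojan://') and 'trojan' not in protocols:
--             protocols.append('trojan')
--         if line.startswith('hysteria2://') and 'hysteria' not in protocols: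
--             protocols.append('hysteria')
--         if line.startswith('hysteria://') and 'hysteria' not in protocols:
--             protocols.append('hysteria')
--         if line.startswith('tuic://') and 'tuic' not in protocols:
--             protocols.append('tuic')
--
--     return protocols
-- ===== SOURCE B (Python) =====
-- from typing import Dict, List, Optional, Union
--
-- _SCHEME_MAP = {
--     'ssr': 'shadowsocksr',
--     'ss': 'shadowsocks',
--     'shadowsocks': 'shadowsocks',
--     'vmess': 'vmess',
--     'vless': 'vless',
--     'trojan': 'trojan',
--     'hysteria2': 'hysteria',
--     'hysteria': 'hysteria',
--     'tuic': 'tuic',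
-- }
--
--
-- def _detect_protocols(content: str) -> List[str]:
--     """Detect protocols in content: one scheme lookup per line instead of nine prefix tests."""
--     protocols: List[str] = []
--     for raw in content.lower().split('\n'):
--         line = raw.strip()
--         i = line.find('://')
--         if i != -1:
--             name = _SCHEME_MAP.get(line[:i])
--             if name is not None and name not in protocols:
--                 protocols.append(name)
--     return protocols
-- ===== Notes on version B (the rewrite author's own statement) =====
-- stated objective: idiomatic
-- what changed: Replaces the nine hard-coded per-line URI-prefix tests and per-protocol duplicate guards by extracting each stripped line's scheme (the text before the first scheme separator) once and looking it up in a scheme-to-protocol dict, appending the name if not yet seen.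
import Mathlib
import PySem

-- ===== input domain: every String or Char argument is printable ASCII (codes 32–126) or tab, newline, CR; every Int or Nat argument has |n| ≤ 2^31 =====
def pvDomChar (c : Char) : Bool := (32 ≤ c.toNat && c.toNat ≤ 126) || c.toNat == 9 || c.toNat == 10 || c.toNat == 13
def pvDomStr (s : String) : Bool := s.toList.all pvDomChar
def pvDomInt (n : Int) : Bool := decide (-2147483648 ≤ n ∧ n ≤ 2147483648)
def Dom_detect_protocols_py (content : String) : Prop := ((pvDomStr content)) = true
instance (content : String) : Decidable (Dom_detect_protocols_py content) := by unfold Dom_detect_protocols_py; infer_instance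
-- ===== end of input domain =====

set_option maxHeartbeats 1000000


-- B replaces A's nine per-line prefix tests by one '://'-scheme extraction and a scheme→name table lookup (idiomatic; same cost).

-- ===== PORT A =====
def pvAddProto (line pre proto : String) (protocols : List String) : List String :=
  if PySem.Str.startswith line pre && !(protocols.contains proto) then protocols ++ [proto]
  else protocols

def pvLineA (protocols : List String) (line0 : String) : List String :=
  let line := PySem.Str.strip line0
  if line == "" then protocols
  else
    pvAddProto line "tuic://" "tuic" (pvAddProto line "hysteria://" "hysteria" (pvAddProto line "hysteria2://" "hysteria" (pvAddProto line "trojan://" "trojan" (pvAddProto line "vless://" "vless" (pvAddProto line "vmess://" "vmess" (pvAddProto line "shadowsocks://" "shadowsocks" (pvAddProto line "ss://" "shadowsocks" (pvAddProto line "ssr://" "shadowsocksr" protocols))))))))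

def detect_protocols_py (content : String) : List String :=
  if content == "" then []
  else
    let content_lower := PySem.Str.lower content
    let lines := (PySem.Str.split? content_lower "\n").getD []
    lines.foldl pvLineA []

-- ===== PORT B =====
def pvSchemeMap : PySem.Dict String String :=
  PySem.Dict.ofList [("ssr", "shadowsocksr"), ("ss", "shadowsocks"), ("shadowsocks", "shadowsocks"), ("vmess", "vmess"), ("vless", "vless"), ("trojan", "trojan"), ("hysteria2", "hysteria"), ("hysteria", "hysteria"), ("tuic", "tuic")]

def pvLineB (protocols : List String) (raw : String) : List String :=
  let line := PySem.Str.strip raw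
  let i := PySem.Str.find line "://"
  if i != -1 then
    match PySem.Dict.get? pvSchemeMap (PySem.Str.slice line none (some i)) with
    | some name => if !(protocols.contains name) then protocols ++ [name] else protocols
    | none => protocols
  else protocols


def detect_protocols_py_alt (content : String) : List String :=
  ((PySem.Str.split? (PySem.Str.lower content) "\n").getD []).foldl pvLineB []

-- ===== PRECONDITION & SPEC =====
def Spec_detect_protocols_py (content : String) (out : List String) : Prop := out = detect_protocols_py_alt content
instance (content : String) (out : List String) : Decidable (Spec_detect_protocols_py content out) := by unfold Spec_detect_protocols_py; infer_instance

-- ===== CLAIM (what is proved, stated in full; the proofs are below) =====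
def Claim_equal_detect_protocols_py : Prop := ∀ (content : String), Dom_detect_protocols_py content → Spec_detect_protocols_py content (detect_protocols_py content)

-- ===== LEMMAS AND PROOFS =====
lemma pv_sw_iff (cs s : List Char) (hs : ':' ∉ s) :
    PySem.Chars.startswith cs (s ++ [':', '/', '/']) = true ↔
      PySem.Chars.find cs [':', '/', '/'] = (s.length : Int) ∧ cs.take s.length = s := by
  rw [PySem.Chars.startswith_iff]
  constructor
  · rintro ⟨t, ht⟩
    have hocc : [':', '/', '/'] <+: cs.drop s.length := by
      rw [← ht]; simp
    have hinf : [':', '/', '/'] <:+: cs := ⟨s, t, by simpa using ht⟩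
    have hnn : (0:Int) ≤ PySem.Chars.find cs [':', '/', '/'] :=
      (PySem.Chars.find_nonneg_iff cs _).mpr hinf
    obtain ⟨hpre, hmin⟩ := PySem.Chars.find_spec hnn
    set i := (PySem.Chars.find cs [':', '/', '/']).toNat with hi
    have hle : i ≤ s.length := by
      by_contra h
      exact hmin s.length (by omega) hocc
    have heq : i = s.length := by
      rcases Nat.lt_or_ge i s.length with hlt | hge
      · exfalso
        obtain ⟨u, hu⟩ := hpre
        have hdrop : cs.drop i = s.drop i ++ ([':', '/', '/'] ++ t) := by
          rw [← ht, List.append_assoc, List.drop_append_of_le_length (by omega)]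
        rw [hdrop] at hu
        have h0 : (s.drop i ++ ([':', '/', '/'] ++ t))[0]? = some ':' := by
          rw [← hu]; rfl
        rw [List.getElem?_append] at h0
        rw [if_pos (by simpa using hlt), List.getElem?_drop] at h0
        exact hs (List.mem_of_getElem? (by simpa using h0))
      · omega
    constructor
    · omega
    · rw [← ht, List.append_assoc]
      simp
  · rintro ⟨hf, htake⟩
    have hnn : (0:Int) ≤ PySem.Chars.find cs [':', '/', '/'] := by rw [hf]; positivity
    obtain ⟨hpre, -⟩ := PySem.Chars.find_spec hnn
    rw [hf] at hpre
    simp only [Int.toNat_natCast] at hpre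
    obtain ⟨u, hu⟩ := hpre
    refine ⟨u, ?_⟩
    rw [List.append_assoc, hu]
    conv_rhs => rw [← List.take_append_drop s.length cs]
    rw [htake]

lemma pv_sw_eqb (cs s : List Char) (hs : ':' ∉ s) :
    PySem.Chars.startswith cs (s ++ [':', '/', '/']) =
      ((PySem.Chars.find cs [':', '/', '/'] == (s.length : Int)) && (cs.take s.length == s)) := by
  rw [Bool.eq_iff_iff, pv_sw_iff cs s hs]
  simp [Bool.and_eq_true, beq_iff_eq]

lemma pv_guard (cs k : List Char) (n : Nat) (hn : n ≤ cs.length) :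
    ((((n : Int)) == ((k.length : Int))) && (cs.take k.length == k)) = (cs.take n == k) := by
  rw [Bool.eq_iff_iff]
  simp only [Bool.and_eq_true, beq_iff_eq]
  constructor
  · rintro ⟨ha, hb⟩
    have : n = k.length := by exact_mod_cast ha
    rw [this]; exact hb
  · intro h
    have hlen : k.length = n := by rw [← h, List.length_take]; omega
    exact ⟨by rw [hlen], by rw [hlen]; exact h⟩

lemma pv_sw_false_of_find_neg (cs s : List Char) (hs : ':' ∉ s)
    (h : PySem.Chars.find cs [':', '/', '/'] = -1) :
    PySem.Chars.startswith cs (s ++ [':', '/', '/']) = false := by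
  rw [pv_sw_eqb cs s hs, h]
  have hne : ((-1 : Int) == (s.length : Int)) = false := by
    rw [beq_eq_false_iff_ne]
    omega
  rw [hne, Bool.false_and]

lemma pv_sw_take (cs s : List Char) (hs : ':' ∉ s) (n : Nat) (hn : n ≤ cs.length)
    (h : PySem.Chars.find cs [':', '/', '/'] = (n : Int)) :
    PySem.Chars.startswith cs (s ++ [':', '/', '/']) = (cs.take n == s) := by
  rw [pv_sw_eqb cs s hs, h, pv_guard cs s n hn]

lemma pv_str_beq (a b : String) : (a == b) = (a.toList == b.toList) := by
  rw [Bool.eq_iff_iff]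
  simp only [beq_iff_eq]
  exact String.toList_inj.symm

lemma pv_line_eq (acc : List String) (raw : String) :
    pvLineA acc raw = pvLineB acc raw := by
  by_cases hls : PySem.Str.strip raw = ""
  · simp only [pvLineA, pvLineB, hls]
    have h0 : (PySem.Str.find "" "://" != -1) = false := by decide
    rw [h0]
    simp
  · simp only [pvLineA, pvLineB]
    rw [if_neg (by simp [beq_iff_eq, hls])]
    set cs := (PySem.Str.strip raw).toList with hcs
    have hfind : PySem.Str.find (PySem.Str.strip raw) "://" = PySem.Chars.find cs [':', '/', '/'] :=
      PySem.Str.find_eq _ _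
    have hmap : pvSchemeMap = PySem.Dict.mk [("ssr", "shadowsocksr"), ("ss", "shadowsocks"), ("shadowsocks", "shadowsocks"), ("vmess", "vmess"), ("vless", "vless"), ("trojan", "trojan"), ("hysteria2", "hysteria"), ("hysteria", "hysteria"), ("tuic", "tuic")] := by decide
    rw [hfind]
    cases hfi : PySem.Chars.find cs [':', '/', '/'] with
    | negSucc m =>
      have hge := PySem.Chars.neg_one_le_find cs [':', '/', '/']
      rw [hfi] at hge
      have hm : m = 0 := by omega
      subst hm
      have hfneg : PySem.Chars.find cs [':', '/', '/'] = -1 := hfi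
      have e1 : PySem.Str.startswith (PySem.Str.strip raw) "ssr://" = false := by
        rw [PySem.Str.startswith_eq]
        exact pv_sw_false_of_find_neg cs "ssr".toList (by decide) hfneg
      have e2 : PySem.Str.startswith (PySem.Str.strip raw) "ss://" = false := by
        rw [PySem.Str.startswith_eq]
        exact pv_sw_false_of_find_neg cs "ss".toList (by decide) hfneg
      have e3 : PySem.Str.startswith (PySem.Str.strip raw) "shadowsocks://" = false := by
        rw [PySem.Str.startswith_eq]
        exact pv_sw_false_of_find_neg cs "shadowsocks".toList (by decide) hfneg
      have e4 : PySem.Str.startswith (PySem.Str.strip raw) "vmess://" = false := by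
        rw [PySem.Str.startswith_eq]
        exact pv_sw_false_of_find_neg cs "vmess".toList (by decide) hfneg
      have e5 : PySem.Str.startswith (PySem.Str.strip raw) "vless://" = false := by
        rw [PySem.Str.startswith_eq]
        exact pv_sw_false_of_find_neg cs "vless".toList (by decide) hfneg
      have e6 : PySem.Str.startswith (PySem.Str.strip raw) "trojan://" = false := by
        rw [PySem.Str.startswith_eq]
        exact pv_sw_false_of_find_neg cs "trojan".toList (by decide) hfneg
      have e7 : PySem.Str.startswith (PySem.Str.strip raw) "hysteria2://" = false := by
        rw [PySem.Str.startswith_eq]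
        exact pv_sw_false_of_find_neg cs "hysteria2".toList (by decide) hfneg
      have e8 : PySem.Str.startswith (PySem.Str.strip raw) "hysteria://" = false := by
        rw [PySem.Str.startswith_eq]
        exact pv_sw_false_of_find_neg cs "hysteria".toList (by decide) hfneg
      have e9 : PySem.Str.startswith (PySem.Str.strip raw) "tuic://" = false := by
        rw [PySem.Str.startswith_eq]
        exact pv_sw_false_of_find_neg cs "tuic".toList (by decide) hfneg
      simp only [pvAddProto, e1, e2, e3, e4, e5, e6, e7, e8, e9, Bool.false_and]
      simp
    | ofNat n =>
      have hlelen := PySem.Chars.find_le_length cs [':', '/', '/']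
      rw [hfi] at hlelen
      have hn : n ≤ cs.length := by
        simp only [Int.ofNat_eq_natCast] at hlelen
        exact_mod_cast hlelen
      have hfi2 : PySem.Chars.find cs [':', '/', '/'] = (n : Int) := hfi
      have hslice : (PySem.Str.slice (PySem.Str.strip raw) none (some (Int.ofNat n))).toList = cs.take n := by
        rw [PySem.Str.toList_slice, PySem.Chars.slice_eq_listSlice]
        exact PySem.List.slice_to_natCast cs n
      have hcond : ((Int.ofNat n) != (-1 : Int)) = true := by
        simp only [Int.ofNat_eq_natCast, bne_iff_ne, ne_eq]
        omega
      rw [hcond, if_pos rfl]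
      have h1 : PySem.Str.startswith (PySem.Str.strip raw) "ssr://" = (cs.take n == "ssr".toList) := by
        rw [PySem.Str.startswith_eq]
        exact pv_sw_take cs "ssr".toList (by decide) n hn hfi2
      have h2 : PySem.Str.startswith (PySem.Str.strip raw) "ss://" = (cs.take n == "ss".toList) := by
        rw [PySem.Str.startswith_eq]
        exact pv_sw_take cs "ss".toList (by decide) n hn hfi2
      have h3 : PySem.Str.startswith (PySem.Str.strip raw) "shadowsocks://" = (cs.take n == "shadowsocks".toList) := by
        rw [PySem.Str.startswith_eq]
        exact pv_sw_take cs "shadowsocks".toList (by decide) n hn hfi2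
      have h4 : PySem.Str.startswith (PySem.Str.strip raw) "vmess://" = (cs.take n == "vmess".toList) := by
        rw [PySem.Str.startswith_eq]
        exact pv_sw_take cs "vmess".toList (by decide) n hn hfi2
      have h5 : PySem.Str.startswith (PySem.Str.strip raw) "vless://" = (cs.take n == "vless".toList) := by
        rw [PySem.Str.startswith_eq]
        exact pv_sw_take cs "vless".toList (by decide) n hn hfi2
      have h6 : PySem.Str.startswith (PySem.Str.strip raw) "trojan://" = (cs.take n == "trojan".toList) := by
        rw [PySem.Str.startswith_eq]
        exact pv_sw_take cs "trojan".toList (by decide) n hn hfi2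
      have h7 : PySem.Str.startswith (PySem.Str.strip raw) "hysteria2://" = (cs.take n == "hysteria2".toList) := by
        rw [PySem.Str.startswith_eq]
        exact pv_sw_take cs "hysteria2".toList (by decide) n hn hfi2
      have h8 : PySem.Str.startswith (PySem.Str.strip raw) "hysteria://" = (cs.take n == "hysteria".toList) := by
        rw [PySem.Str.startswith_eq]
        exact pv_sw_take cs "hysteria".toList (by decide) n hn hfi2
      have h9 : PySem.Str.startswith (PySem.Str.strip raw) "tuic://" = (cs.take n == "tuic".toList) := by
        rw [PySem.Str.startswith_eq]
        exact pv_sw_take cs "tuic".toList (by decide) n hn hfi2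
      by_cases c1 : cs.take n = "ssr".toList
      · have hkey : PySem.Str.slice (PySem.Str.strip raw) none (some (Int.ofNat n)) = "ssr" :=
          String.toList_inj.mp (hslice.trans c1)
        have e1 : PySem.Str.startswith (PySem.Str.strip raw) "ssr://" = true := by
          rw [h1, c1]; decide
        have e2 : PySem.Str.startswith (PySem.Str.strip raw) "ss://" = false := by
          rw [h2, c1]; decide
        have e3 : PySem.Str.startswith (PySem.Str.strip raw) "shadowsocks://" = false := by
          rw [h3, c1]; decide
        have e4 : PySem.Str.startswith (PySem.Str.strip raw) "vmess://" = false := by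
          rw [h4, c1]; decide
        have e5 : PySem.Str.startswith (PySem.Str.strip raw) "vless://" = false := by
          rw [h5, c1]; decide
        have e6 : PySem.Str.startswith (PySem.Str.strip raw) "trojan://" = false := by
          rw [h6, c1]; decide
        have e7 : PySem.Str.startswith (PySem.Str.strip raw) "hysteria2://" = false := by
          rw [h7, c1]; decide
        have e8 : PySem.Str.startswith (PySem.Str.strip raw) "hysteria://" = false := by
          rw [h8, c1]; decide
        have e9 : PySem.Str.startswith (PySem.Str.strip raw) "tuic://" = false := by
          rw [h9, c1]; decide
        have hget : (PySem.Dict.mk [("ssr", "shadowsocksr"), ("ss", "shadowsocks"), ("shadowsocks", "shadowsocks"), ("vmess", "vmess"), ("vless", "vless"), ("trojan", "trojan"), ("hysteria2", "hysteria"), ("hysteria", "hysteria"), ("tuic", "tuic")]).get? "ssr" = some "shadowsocksr" := by decide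
        rw [hmap, hkey, hget]
        simp only [pvAddProto, e1, e2, e3, e4, e5, e6, e7, e8, e9, Bool.false_and, Bool.true_and]
        cases hc : acc.contains "shadowsocksr" <;> simp at hc <;> simp [hc]
      by_cases c2 : cs.take n = "ss".toList
      · have hkey : PySem.Str.slice (PySem.Str.strip raw) none (some (Int.ofNat n)) = "ss" :=
          String.toList_inj.mp (hslice.trans c2)
        have e1 : PySem.Str.startswith (PySem.Str.strip raw) "ssr://" = false := by
          rw [h1, c2]; decide
        have e2 : PySem.Str.startswith (PySem.Str.strip raw) "ss://" = true := by
          rw [h2, c2]; decide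
        have e3 : PySem.Str.startswith (PySem.Str.strip raw) "shadowsocks://" = false := by
          rw [h3, c2]; decide
        have e4 : PySem.Str.startswith (PySem.Str.strip raw) "vmess://" = false := by
          rw [h4, c2]; decide
        have e5 : PySem.Str.startswith (PySem.Str.strip raw) "vless://" = false := by
          rw [h5, c2]; decide
        have e6 : PySem.Str.startswith (PySem.Str.strip raw) "trojan://" = false := by
          rw [h6, c2]; decide
        have e7 : PySem.Str.startswith (PySem.Str.strip raw) "hysteria2://" = false := by
          rw [h7, c2]; decide
        have e8 : PySem.Str.startswith (PySem.Str.strip raw) "hysteria://" = false := by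
          rw [h8, c2]; decide
        have e9 : PySem.Str.startswith (PySem.Str.strip raw) "tuic://" = false := by
          rw [h9, c2]; decide
        have hget : (PySem.Dict.mk [("ssr", "shadowsocksr"), ("ss", "shadowsocks"), ("shadowsocks", "shadowsocks"), ("vmess", "vmess"), ("vless", "vless"), ("trojan", "trojan"), ("hysteria2", "hysteria"), ("hysteria", "hysteria"), ("tuic", "tuic")]).get? "ss" = some "shadowsocks" := by decide
        rw [hmap, hkey, hget]
        simp only [pvAddProto, e1, e2, e3, e4, e5, e6, e7, e8, e9, Bool.false_and, Bool.true_and]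
        cases hc : acc.contains "shadowsocks" <;> simp at hc <;> simp [hc]
      by_cases c3 : cs.take n = "shadowsocks".toList
      · have hkey : PySem.Str.slice (PySem.Str.strip raw) none (some (Int.ofNat n)) = "shadowsocks" :=
          String.toList_inj.mp (hslice.trans c3)
        have e1 : PySem.Str.startswith (PySem.Str.strip raw) "ssr://" = false := by
          rw [h1, c3]; decide
        have e2 : PySem.Str.startswith (PySem.Str.strip raw) "ss://" = false := by
          rw [h2, c3]; decide
        have e3 : PySem.Str.startswith (PySem.Str.strip raw) "shadowsocks://" = true := by
          rw [h3, c3]; decide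
        have e4 : PySem.Str.startswith (PySem.Str.strip raw) "vmess://" = false := by
          rw [h4, c3]; decide
        have e5 : PySem.Str.startswith (PySem.Str.strip raw) "vless://" = false := by
          rw [h5, c3]; decide
        have e6 : PySem.Str.startswith (PySem.Str.strip raw) "trojan://" = false := by
          rw [h6, c3]; decide
        have e7 : PySem.Str.startswith (PySem.Str.strip raw) "hysteria2://" = false := by
          rw [h7, c3]; decide
        have e8 : PySem.Str.startswith (PySem.Str.strip raw) "hysteria://" = false := by
          rw [h8, c3]; decide
        have e9 : PySem.Str.startswith (PySem.Str.strip raw) "tuic://" = false := by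
          rw [h9, c3]; decide
        have hget : (PySem.Dict.mk [("ssr", "shadowsocksr"), ("ss", "shadowsocks"), ("shadowsocks", "shadowsocks"), ("vmess", "vmess"), ("vless", "vless"), ("trojan", "trojan"), ("hysteria2", "hysteria"), ("hysteria", "hysteria"), ("tuic", "tuic")]).get? "shadowsocks" = some "shadowsocks" := by decide
        rw [hmap, hkey, hget]
        simp only [pvAddProto, e1, e2, e3, e4, e5, e6, e7, e8, e9, Bool.false_and, Bool.true_and]
        cases hc : acc.contains "shadowsocks" <;> simp at hc <;> simp [hc]
      by_cases c4 : cs.take n = "vmess".toList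
      · have hkey : PySem.Str.slice (PySem.Str.strip raw) none (some (Int.ofNat n)) = "vmess" :=
          String.toList_inj.mp (hslice.trans c4)
        have e1 : PySem.Str.startswith (PySem.Str.strip raw) "ssr://" = false := by
          rw [h1, c4]; decide
        have e2 : PySem.Str.startswith (PySem.Str.strip raw) "ss://" = false := by
          rw [h2, c4]; decide
        have e3 : PySem.Str.startswith (PySem.Str.strip raw) "shadowsocks://" = false := by
          rw [h3, c4]; decide
        have e4 : PySem.Str.startswith (PySem.Str.strip raw) "vmess://" = true := by
          rw [h4, c4]; decide
        have e5 : PySem.Str.startswith (PySem.Str.strip raw) "vless://" = false := by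
          rw [h5, c4]; decide
        have e6 : PySem.Str.startswith (PySem.Str.strip raw) "trojan://" = false := by
          rw [h6, c4]; decide
        have e7 : PySem.Str.startswith (PySem.Str.strip raw) "hysteria2://" = false := by
          rw [h7, c4]; decide
        have e8 : PySem.Str.startswith (PySem.Str.strip raw) "hysteria://" = false := by
          rw [h8, c4]; decide
        have e9 : PySem.Str.startswith (PySem.Str.strip raw) "tuic://" = false := by
          rw [h9, c4]; decide
        have hget : (PySem.Dict.mk [("ssr", "shadowsocksr"), ("ss", "shadowsocks"), ("shadowsocks", "shadowsocks"), ("vmess", "vmess"), ("vless", "vless"), ("trojan", "trojan"), ("hysteria2", "hysteria"), ("hysteria", "hysteria"), ("tuic", "tuic")]).get? "vmess" = some "vmess" := by decide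
        rw [hmap, hkey, hget]
        simp only [pvAddProto, e1, e2, e3, e4, e5, e6, e7, e8, e9, Bool.false_and, Bool.true_and]
        cases hc : acc.contains "vmess" <;> simp at hc <;> simp [hc]
      by_cases c5 : cs.take n = "vless".toList
      · have hkey : PySem.Str.slice (PySem.Str.strip raw) none (some (Int.ofNat n)) = "vless" :=
          String.toList_inj.mp (hslice.trans c5)
        have e1 : PySem.Str.startswith (PySem.Str.strip raw) "ssr://" = false := by
          rw [h1, c5]; decide
        have e2 : PySem.Str.startswith (PySem.Str.strip raw) "ss://" = false := by
          rw [h2, c5]; decide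
        have e3 : PySem.Str.startswith (PySem.Str.strip raw) "shadowsocks://" = false := by
          rw [h3, c5]; decide
        have e4 : PySem.Str.startswith (PySem.Str.strip raw) "vmess://" = false := by
          rw [h4, c5]; decide
        have e5 : PySem.Str.startswith (PySem.Str.strip raw) "vless://" = true := by
          rw [h5, c5]; decide
        have e6 : PySem.Str.startswith (PySem.Str.strip raw) "trojan://" = false := by
          rw [h6, c5]; decide
        have e7 : PySem.Str.startswith (PySem.Str.strip raw) "hysteria2://" = false := by
          rw [h7, c5]; decide
        have e8 : PySem.Str.startswith (PySem.Str.strip raw) "hysteria://" = false := by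
          rw [h8, c5]; decide
        have e9 : PySem.Str.startswith (PySem.Str.strip raw) "tuic://" = false := by
          rw [h9, c5]; decide
        have hget : (PySem.Dict.mk [("ssr", "shadowsocksr"), ("ss", "shadowsocks"), ("shadowsocks", "shadowsocks"), ("vmess", "vmess"), ("vless", "vless"), ("trojan", "trojan"), ("hysteria2", "hysteria"), ("hysteria", "hysteria"), ("tuic", "tuic")]).get? "vless" = some "vless" := by decide
        rw [hmap, hkey, hget]
        simp only [pvAddProto, e1, e2, e3, e4, e5, e6, e7, e8, e9, Bool.false_and, Bool.true_and]
        cases hc : acc.contains "vless" <;> simp at hc <;> simp [hc]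
      by_cases c6 : cs.take n = "trojan".toList
      · have hkey : PySem.Str.slice (PySem.Str.strip raw) none (some (Int.ofNat n)) = "trojan" :=
          String.toList_inj.mp (hslice.trans c6)
        have e1 : PySem.Str.startswith (PySem.Str.strip raw) "ssr://" = false := by
          rw [h1, c6]; decide
        have e2 : PySem.Str.startswith (PySem.Str.strip raw) "ss://" = false := by
          rw [h2, c6]; decide
        have e3 : PySem.Str.startswith (PySem.Str.strip raw) "shadowsocks://" = false := by
          rw [h3, c6]; decide
        have e4 : PySem.Str.startswith (PySem.Str.strip raw) "vmess://" = false := by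
          rw [h4, c6]; decide
        have e5 : PySem.Str.startswith (PySem.Str.strip raw) "vless://" = false := by
          rw [h5, c6]; decide
        have e6 : PySem.Str.startswith (PySem.Str.strip raw) "trojan://" = true := by
          rw [h6, c6]; decide
        have e7 : PySem.Str.startswith (PySem.Str.strip raw) "hysteria2://" = false := by
          rw [h7, c6]; decide
        have e8 : PySem.Str.startswith (PySem.Str.strip raw) "hysteria://" = false := by
          rw [h8, c6]; decide
        have e9 : PySem.Str.startswith (PySem.Str.strip raw) "tuic://" = false := by
          rw [h9, c6]; decide
        have hget : (PySem.Dict.mk [("ssr", "shadowsocksr"), ("ss", "shadowsocks"), ("shadowsocks", "shadowsocks"), ("vmess", "vmess"), ("vless", "vless"), ("trojan", "trojan"), ("hysteria2", "hysteria"), ("hysteria", "hysteria"), ("tuic", "tuic")]).get? "trojan" = some "trojan" := by decide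
        rw [hmap, hkey, hget]
        simp only [pvAddProto, e1, e2, e3, e4, e5, e6, e7, e8, e9, Bool.false_and, Bool.true_and]
        cases hc : acc.contains "trojan" <;> simp at hc <;> simp [hc]
      by_cases c7 : cs.take n = "hysteria2".toList
      · have hkey : PySem.Str.slice (PySem.Str.strip raw) none (some (Int.ofNat n)) = "hysteria2" :=
          String.toList_inj.mp (hslice.trans c7)
        have e1 : PySem.Str.startswith (PySem.Str.strip raw) "ssr://" = false := by
          rw [h1, c7]; decide
        have e2 : PySem.Str.startswith (PySem.Str.strip raw) "ss://" = false := by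
          rw [h2, c7]; decide
        have e3 : PySem.Str.startswith (PySem.Str.strip raw) "shadowsocks://" = false := by
          rw [h3, c7]; decide
        have e4 : PySem.Str.startswith (PySem.Str.strip raw) "vmess://" = false := by
          rw [h4, c7]; decide
        have e5 : PySem.Str.startswith (PySem.Str.strip raw) "vless://" = false := by
          rw [h5, c7]; decide
        have e6 : PySem.Str.startswith (PySem.Str.strip raw) "trojan://" = false := by
          rw [h6, c7]; decide
        have e7 : PySem.Str.startswith (PySem.Str.strip raw) "hysteria2://" = true := by
          rw [h7, c7]; decide
        have e8 : PySem.Str.startswith (PySem.Str.strip raw) "hysteria://" = false := by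
          rw [h8, c7]; decide
        have e9 : PySem.Str.startswith (PySem.Str.strip raw) "tuic://" = false := by
          rw [h9, c7]; decide
        have hget : (PySem.Dict.mk [("ssr", "shadowsocksr"), ("ss", "shadowsocks"), ("shadowsocks", "shadowsocks"), ("vmess", "vmess"), ("vless", "vless"), ("trojan", "trojan"), ("hysteria2", "hysteria"), ("hysteria", "hysteria"), ("tuic", "tuic")]).get? "hysteria2" = some "hysteria" := by decide
        rw [hmap, hkey, hget]
        simp only [pvAddProto, e1, e2, e3, e4, e5, e6, e7, e8, e9, Bool.false_and, Bool.true_and]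
        cases hc : acc.contains "hysteria" <;> simp at hc <;> simp [hc]
      by_cases c8 : cs.take n = "hysteria".toList
      · have hkey : PySem.Str.slice (PySem.Str.strip raw) none (some (Int.ofNat n)) = "hysteria" :=
          String.toList_inj.mp (hslice.trans c8)
        have e1 : PySem.Str.startswith (PySem.Str.strip raw) "ssr://" = false := by
          rw [h1, c8]; decide
        have e2 : PySem.Str.startswith (PySem.Str.strip raw) "ss://" = false := by
          rw [h2, c8]; decide
        have e3 : PySem.Str.startswith (PySem.Str.strip raw) "shadowsocks://" = false := by
          rw [h3, c8]; decide
        have e4 : PySem.Str.startswith (PySem.Str.strip raw) "vmess://" = false := by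
          rw [h4, c8]; decide
        have e5 : PySem.Str.startswith (PySem.Str.strip raw) "vless://" = false := by
          rw [h5, c8]; decide
        have e6 : PySem.Str.startswith (PySem.Str.strip raw) "trojan://" = false := by
          rw [h6, c8]; decide
        have e7 : PySem.Str.startswith (PySem.Str.strip raw) "hysteria2://" = false := by
          rw [h7, c8]; decide
        have e8 : PySem.Str.startswith (PySem.Str.strip raw) "hysteria://" = true := by
          rw [h8, c8]; decide
        have e9 : PySem.Str.startswith (PySem.Str.strip raw) "tuic://" = false := by
          rw [h9, c8]; decide
        have hget : (PySem.Dict.mk [("ssr", "shadowsocksr"), ("ss", "shadowsocks"), ("shadowsocks", "shadowsocks"), ("vmess", "vmess"), ("vless", "vless"), ("trojan", "trojan"), ("hysteria2", "hysteria"), ("hysteria", "hysteria"), ("tuic", "tuic")]).get? "hysteria" = some "hysteria" := by decide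
        rw [hmap, hkey, hget]
        simp only [pvAddProto, e1, e2, e3, e4, e5, e6, e7, e8, e9, Bool.false_and, Bool.true_and]
        cases hc : acc.contains "hysteria" <;> simp at hc <;> simp [hc]
      by_cases c9 : cs.take n = "tuic".toList
      · have hkey : PySem.Str.slice (PySem.Str.strip raw) none (some (Int.ofNat n)) = "tuic" :=
          String.toList_inj.mp (hslice.trans c9)
        have e1 : PySem.Str.startswith (PySem.Str.strip raw) "ssr://" = false := by
          rw [h1, c9]; decide
        have e2 : PySem.Str.startswith (PySem.Str.strip raw) "ss://" = false := by
          rw [h2, c9]; decide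
        have e3 : PySem.Str.startswith (PySem.Str.strip raw) "shadowsocks://" = false := by
          rw [h3, c9]; decide
        have e4 : PySem.Str.startswith (PySem.Str.strip raw) "vmess://" = false := by
          rw [h4, c9]; decide
        have e5 : PySem.Str.startswith (PySem.Str.strip raw) "vless://" = false := by
          rw [h5, c9]; decide
        have e6 : PySem.Str.startswith (PySem.Str.strip raw) "trojan://" = false := by
          rw [h6, c9]; decide
        have e7 : PySem.Str.startswith (PySem.Str.strip raw) "hysteria2://" = false := by
          rw [h7, c9]; decide
        have e8 : PySem.Str.startswith (PySem.Str.strip raw) "hysteria://" = false := by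
          rw [h8, c9]; decide
        have e9 : PySem.Str.startswith (PySem.Str.strip raw) "tuic://" = true := by
          rw [h9, c9]; decide
        have hget : (PySem.Dict.mk [("ssr", "shadowsocksr"), ("ss", "shadowsocks"), ("shadowsocks", "shadowsocks"), ("vmess", "vmess"), ("vless", "vless"), ("trojan", "trojan"), ("hysteria2", "hysteria"), ("hysteria", "hysteria"), ("tuic", "tuic")]).get? "tuic" = some "tuic" := by decide
        rw [hmap, hkey, hget]
        simp only [pvAddProto, e1, e2, e3, e4, e5, e6, e7, e8, e9, Bool.false_and, Bool.true_and]
        cases hc : acc.contains "tuic" <;> simp at hc <;> simp [hc]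
      · have hget : (PySem.Dict.mk [("ssr", "shadowsocksr"), ("ss", "shadowsocks"), ("shadowsocks", "shadowsocks"), ("vmess", "vmess"), ("vless", "vless"), ("trojan", "trojan"), ("hysteria2", "hysteria"), ("hysteria", "hysteria"), ("tuic", "tuic")]).get? (PySem.Str.slice (PySem.Str.strip raw) none (some (Int.ofNat n))) = none := by
          simp only [PySem.Dict.get?_mk_cons, pv_str_beq, hslice, beq_iff_eq]
          rw [if_neg (fun h => c1 h.symm)]
          rw [if_neg (fun h => c2 h.symm)]
          rw [if_neg (fun h => c3 h.symm)]
          rw [if_neg (fun h => c4 h.symm)]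
          rw [if_neg (fun h => c5 h.symm)]
          rw [if_neg (fun h => c6 h.symm)]
          rw [if_neg (fun h => c7 h.symm)]
          rw [if_neg (fun h => c8 h.symm)]
          rw [if_neg (fun h => c9 h.symm)]
          rfl
        have e1 : PySem.Str.startswith (PySem.Str.strip raw) "ssr://" = false := by
          rw [h1, beq_eq_false_iff_ne]; exact c1
        have e2 : PySem.Str.startswith (PySem.Str.strip raw) "ss://" = false := by
          rw [h2, beq_eq_false_iff_ne]; exact c2
        have e3 : PySem.Str.startswith (PySem.Str.strip raw) "shadowsocks://" = false := by
          rw [h3, beq_eq_false_iff_ne]; exact c3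
        have e4 : PySem.Str.startswith (PySem.Str.strip raw) "vmess://" = false := by
          rw [h4, beq_eq_false_iff_ne]; exact c4
        have e5 : PySem.Str.startswith (PySem.Str.strip raw) "vless://" = false := by
          rw [h5, beq_eq_false_iff_ne]; exact c5
        have e6 : PySem.Str.startswith (PySem.Str.strip raw) "trojan://" = false := by
          rw [h6, beq_eq_false_iff_ne]; exact c6
        have e7 : PySem.Str.startswith (PySem.Str.strip raw) "hysteria2://" = false := by
          rw [h7, beq_eq_false_iff_ne]; exact c7
        have e8 : PySem.Str.startswith (PySem.Str.strip raw) "hysteria://" = false := by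
          rw [h8, beq_eq_false_iff_ne]; exact c8
        have e9 : PySem.Str.startswith (PySem.Str.strip raw) "tuic://" = false := by
          rw [h9, beq_eq_false_iff_ne]; exact c9
        rw [hmap, hget]
        simp only [pvAddProto, e1, e2, e3, e4, e5, e6, e7, e8, e9, Bool.false_and]
        simp

-- ===== VERDICT (by name: the statement is the Claim_ definition above) =====
theorem detect_protocols_py_spec : Claim_equal_detect_protocols_py := by
  intro content _
  unfold Spec_detect_protocols_py detect_protocols_py detect_protocols_py_alt
  have hf : pvLineA = pvLineB := funext fun p => funext fun r => pv_line_eq p r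
  by_cases h : content = ""
  · subst h; decide
  · simp [h, hf]
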